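-- pv_equiv track=rewrite | github.com/LexMaxis/LeetCode | WeekCompetition/Week261/5890.py | miniumMoves
-- ===== SOURCE A (Python) =====
-- def miniumMoves(s):
--     ans = 0
--     n = len(s)
--     l = 0
--     while l < n:
--         if s[l] == 'X':
--             l += 3
--             ans += 1
--         else:
--              l += 1
--
--     return ans
-- ===== SOURCE B (Python) =====
-- def miniumMoves(s):
--     xs = [i for i, c in enumerate(s) if c == 'X']
--     ans = 0
--     cursor = -1
--     for i in xs:
--         if i >= cursor:
--             ans += 1
--             cursor = i + 3
--     return ans
-- ===== Notes on version B (the rewrite author's own statement) =====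
-- stated objective: alternative
-- what changed: Replaced the jumping while-loop over character positions by two passes: first collect the indices of 'X' into a list, then greedily select covers by folding over that index list with a next-uncovered cursor.
import Mathlib
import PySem

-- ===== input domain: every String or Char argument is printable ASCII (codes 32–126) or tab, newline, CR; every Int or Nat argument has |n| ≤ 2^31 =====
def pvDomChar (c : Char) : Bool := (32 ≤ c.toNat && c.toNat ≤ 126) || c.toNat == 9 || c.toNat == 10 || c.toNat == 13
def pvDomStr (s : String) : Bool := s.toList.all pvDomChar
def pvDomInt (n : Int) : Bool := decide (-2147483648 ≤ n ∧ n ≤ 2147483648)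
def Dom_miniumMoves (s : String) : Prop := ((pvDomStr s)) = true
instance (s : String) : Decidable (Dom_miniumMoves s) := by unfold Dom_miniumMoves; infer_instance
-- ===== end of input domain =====

-- B replaces A's jumping while-loop over positions by two passes (collect the 'X' indices,
-- then fold over them with a next-uncovered cursor); alternative decomposition, same cost.

-- ===== PORT A =====
-- the while-loop of A: index l walks over the characters, jumping by 3 after an 'X'
def miniumMovesLoop (cs : List Char) (n l : Nat) (ans : Int) : Int :=
  if l < n then
    if cs.getD l ' ' = 'X' then miniumMovesLoop cs n (l + 3) (ans + 1)
    else miniumMovesLoop cs n (l + 1) ans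
  else ans
termination_by n - l

def miniumMoves (s : String) : Int :=
  miniumMovesLoop s.toList s.toList.length 0 0

-- ===== PORT B =====
def miniumMoves_alt (s : String) : Int :=
  let xs := ((PySem.List.enumerate s.toList 0).filter (fun p => p.2 == 'X')).map Prod.fst
  (xs.foldl (fun (st : Int × Int) i => if st.2 ≤ i then (st.1 + 1, i + 3) else st)
    ((0 : Int), (-1 : Int))).1

-- ===== PRECONDITION & SPEC =====
def Spec_miniumMoves (s : String) (out : Int) : Prop := out = miniumMoves_alt s
instance (s : String) (out : Int) : Decidable (Spec_miniumMoves s out) := by unfold Spec_miniumMoves; infer_instance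

-- ===== CLAIM (what is proved, stated in full; the proofs are below) =====
def Claim_equal_miniumMoves : Prop := ∀ (s : String), Dom_miniumMoves s → Spec_miniumMoves s (miniumMoves s)

-- ===== LEMMAS AND PROOFS =====

-- common reference value: greedy count on the character list
def gX : List Char → Int
  | [] => 0
  | c :: t => if c = 'X' then 1 + gX (t.drop 2) else gX t
termination_by l => l.length
decreasing_by all_goals simp

-- the list of indices (offset k) of the 'X' characters
def xidx : List Char → Int → List Int
  | [], _ => []
  | c :: t, k => if c = 'X' then k :: xidx t (k + 1) else xidx t (k + 1)

lemma filt_eq (cs : List Char) (k : Int) :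
    ((PySem.List.enumerate cs k).filter (fun p => p.2 == 'X')).map Prod.fst = xidx cs k := by
  induction cs generalizing k with
  | nil => simp [PySem.List.enumerate_nil, xidx]
  | cons c t ih =>
    simp only [PySem.List.enumerate_cons, List.filter_cons, xidx]
    by_cases h : c = 'X' <;> simp [h, ih]

lemma aLoop_eq (cs : List Char) :
    ∀ k l, cs.length - l ≤ k → ∀ ans : Int,
      miniumMovesLoop cs cs.length l ans = ans + gX (cs.drop l) := by
  intro k
  induction k with
  | zero =>
    intro l hl ans
    have h : ¬ l < cs.length := by omega
    rw [miniumMovesLoop]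
    simp [h, List.drop_eq_nil_of_le (by omega : cs.length ≤ l), gX]
  | succ k ih =>
    intro l hl ans
    by_cases h : l < cs.length
    · have hdrop : cs.drop l = cs[l] :: cs.drop (l + 1) :=
        List.drop_eq_getElem_cons h
      have hgetD : cs.getD l ' ' = cs[l] := List.getD_eq_getElem cs ' ' h
      rw [miniumMovesLoop]
      by_cases hx : cs[l] = 'X'
      · rw [if_pos h, hgetD, if_pos hx, ih (l + 3) (by omega), hdrop]
        have e : (cs.drop (l + 1)).drop 2 = cs.drop (l + 3) := by
          rw [List.drop_drop]
        simp only [gX, hx, if_true, e]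
        ring
      · rw [if_pos h, hgetD, if_neg hx, ih (l + 1) (by omega), hdrop]
        simp only [gX, hx, if_false]
    · rw [miniumMovesLoop]
      simp [h, List.drop_eq_nil_of_le (by omega : cs.length ≤ l), gX]

lemma fold_eq (cs : List Char) :
    ∀ (k ans c : Int),
      ((xidx cs k).foldl (fun (st : Int × Int) i => if st.2 ≤ i then (st.1 + 1, i + 3) else st)
        (ans, c)).1 = ans + gX (cs.drop (c - k).toNat) := by
  induction cs with
  | nil => intro k ans c; simp [xidx, gX]
  | cons c0 t ih =>
    intro k ans c
    by_cases hle : c ≤ k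
    · have h0 : (c - k).toNat = 0 := by omega
      have h1 : (c - (k + 1)).toNat = 0 := by omega
      by_cases hx : c0 = 'X'
      · simp only [xidx, hx, if_true, List.foldl_cons, if_pos hle]
        rw [ih (k + 1)]
        simp [h0, gX]
        ring
      · simp only [xidx, hx, if_false]
        rw [ih (k + 1)]
        simp [h0, h1, gX, hx]
    · have h2 : (c - k).toNat = (c - (k + 1)).toNat + 1 := by omega
      have hdrop : (c0 :: t).drop ((c - k).toNat) = t.drop ((c - (k + 1)).toNat) := by
        rw [h2]; simp
      by_cases hx : c0 = 'X'
      · subst hx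
        simp only [xidx, if_true, List.foldl_cons, if_neg hle]
        rw [ih (k + 1), hdrop]
      · simp only [xidx, hx, if_false]
        rw [ih (k + 1), hdrop]

-- ===== VERDICT (by name: the statement is the Claim_ definition above) =====
theorem miniumMoves_spec : Claim_equal_miniumMoves := by
  intro s _
  unfold Spec_miniumMoves miniumMoves miniumMoves_alt
  rw [filt_eq, fold_eq]
  rw [aLoop_eq s.toList s.toList.length 0 (by omega)]
  simp
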